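-- pv_equiv track=rewrite | github.com/btrif/Python_dev_repo | Project EULER/pb169 number can be expressed as a sum of powers of 2.py | partition_nr_into_given_set_of_nrs
-- ===== SOURCE A (Python) =====
-- def partition_nr_into_given_set_of_nrs(nr, S,  lim=10 ):
--     nrs = sorted(S, reverse=True)
--     def inner(n, i, lim ):
--         if lim >= 0 :
--             if n == 0:
--                 yield []
--             for k in range(i, len(nrs)):
--                 if nrs[k] <= n:
--                     for rest in inner(n - nrs[k], k , lim-1 ):
--
--                         yield [nrs[k]] + rest
--     return list(inner(nr, 0, lim))
-- ===== SOURCE B (Python) =====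
-- def partition_nr_into_given_set_of_nrs(nr, S, lim=10):
--     # Iterative DFS with an explicit stack of (remaining, start_index, budget, prefix)
--     # states instead of A's recursive generator; same output list, same order.
--     nrs = sorted(S, reverse=True)
--     out = []
--     stack = [(nr, 0, lim, [])]
--     while stack:
--         n, i, budget, prefix = stack.pop()
--         if budget < 0:
--             continue
--         if n == 0:
--             out.append(prefix)
--         for k in range(len(nrs) - 1, i - 1, -1):
--             if nrs[k] <= n:
--                 stack.append((n - nrs[k], k, budget - 1, prefix + [nrs[k]]))
--     return out
-- ===== Notes on version B (the rewrite author's own statement) =====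
-- stated objective: alternative
-- what changed: A's recursive generator is replaced by an iterative depth-first search over an explicit stack of (remaining, start_index, budget, prefix) states, pushing children in reverse index order so the output list and its order are identical.
-- outside the precondition, e.g. on partition_nr_into_given_set_of_nrs(1000000, [1], 950): A returns [], B returns []; on partition_nr_into_given_set_of_nrs(5, [-2], 950): A returns [], B returns []
import Mathlib
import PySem

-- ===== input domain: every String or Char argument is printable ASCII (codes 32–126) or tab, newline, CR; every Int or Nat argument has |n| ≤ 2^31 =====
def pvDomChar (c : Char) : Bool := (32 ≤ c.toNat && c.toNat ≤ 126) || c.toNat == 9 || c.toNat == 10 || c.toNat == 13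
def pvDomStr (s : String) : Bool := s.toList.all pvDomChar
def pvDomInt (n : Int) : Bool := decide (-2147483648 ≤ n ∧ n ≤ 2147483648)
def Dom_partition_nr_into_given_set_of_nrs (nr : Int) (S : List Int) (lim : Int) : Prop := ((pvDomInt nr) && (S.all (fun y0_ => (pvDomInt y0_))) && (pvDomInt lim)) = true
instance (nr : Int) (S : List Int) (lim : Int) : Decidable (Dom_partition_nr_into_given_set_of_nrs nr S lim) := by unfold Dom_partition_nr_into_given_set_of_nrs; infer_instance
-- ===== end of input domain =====

-- B replaces A's recursive generator by an iterative DFS over an explicit stack of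
-- (remaining, start_index, budget, pref) states (objective: alternative decomposition,
-- same output list in the same order).

-- ===== PORT A =====
-- A's inner generator, yielding the partition list in generator order.
-- k always lies in [i, len nrs) here, so nrs[k] is ported as pyGetD with a dummy default.
def pvInnerA (nrs : List Int) (n : Int) (i : Int) (lim : Int) : List (List Int) :=
  if h : 0 ≤ lim then
    (if n = 0 then [[]] else []) ++
    (PySem.List.pyRange i (nrs.length : Int) 1).flatMap (fun k =>
      let v := PySem.List.pyGetD nrs k 0
      if v ≤ n then (pvInnerA nrs (n - v) k (lim - 1)).map (fun rest => v :: rest) else [])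
  else []
termination_by (lim + 1).toNat
decreasing_by omega

def partition_nr_into_given_set_of_nrs (nr : Int) (S : List Int) (lim : Int) : List (List Int) :=
  let nrs := PySem.List.sorted S (fun x => x) true
  pvInnerA nrs nr 0 lim

-- ===== PORT B =====
-- B's while loop: pop a state, emit its pref when remaining == 0, push children in
-- decreasing k so they are popped in increasing k.  fuel is a totality guard only;
-- the top-level call supplies enough fuel for the loop to drain the stack.
def pvLoopB (nrs : List Int) (fuel : Nat) (stack : List (Int × Int × Int × List Int))
    (out : List (List Int)) : List (List Int) :=
  match fuel, stack with
  | _, [] => out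
  | 0, _ => out
  | fuel + 1, (n, i, budget, pref) :: rest =>
    if budget < 0 then pvLoopB nrs fuel rest out
    else
      let out' := if n = 0 then out ++ [pref] else out
      let stack' := (PySem.List.pyRange ((nrs.length : Int) - 1) (i - 1) (-1)).foldl
        (fun st k =>
          let v := PySem.List.pyGetD nrs k 0
          if v ≤ n then (n - v, k, budget - 1, pref ++ [v]) :: st else st) rest
      pvLoopB nrs fuel stack' out'

def partition_nr_into_given_set_of_nrs_alt (nr : Int) (S : List Int) (lim : Int) : List (List Int) :=
  let nrs := PySem.List.sorted S (fun x => x) true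
  pvLoopB nrs ((nrs.length + 1) ^ (lim + 1).toNat) [(nr, 0, lim, [])] []

-- ===== PRECONDITION & SPEC =====
-- Pre_ excludes exactly the inputs on which Python A can hit CPython's recursion limit
-- (RecursionError): a deep search needs lim > 900 AND some element ≤ nr (so recursion
-- starts at all) AND either a nonpositive element ≤ nr (an unboundedly repeatable step)
-- or a positive minimum small enough that nr/min exceeds 900.  The 900 threshold is
-- conservative, so a narrow band of depth-900..1000 searches on which A still returns
-- (e.g. the cites in claim.json) is also excluded.
def Pre_partition_nr_into_given_set_of_nrs (nr : Int) (S : List Int) (lim : Int) : Prop :=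
  lim ≤ 900 ∨ (∀ x ∈ S, nr < x) ∨ (∀ x ∈ S, 0 < x ∧ nr ≤ 900 * x)
instance (nr : Int) (S : List Int) (lim : Int) : Decidable (Pre_partition_nr_into_given_set_of_nrs nr S lim) := by unfold Pre_partition_nr_into_given_set_of_nrs; infer_instance
def pvWitness_partition_nr_into_given_set_of_nrs : Int × List Int × Int := (6, [1, 2, 3], 3)

def Spec_partition_nr_into_given_set_of_nrs (nr : Int) (S : List Int) (lim : Int) (out : List (List Int)) : Prop := out = partition_nr_into_given_set_of_nrs_alt nr S lim
instance (nr : Int) (S : List Int) (lim : Int) (out : List (List Int)) : Decidable (Spec_partition_nr_into_given_set_of_nrs nr S lim out) := by unfold Spec_partition_nr_into_given_set_of_nrs; infer_instance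

-- ===== CLAIM (what is proved, stated in full; the proofs are below) =====
def Claim_equal_partition_nr_into_given_set_of_nrs : Prop := ∀ (nr : Int) (S : List Int) (lim : Int), Dom_partition_nr_into_given_set_of_nrs nr S lim → Pre_partition_nr_into_given_set_of_nrs nr S lim → Spec_partition_nr_into_given_set_of_nrs nr S lim (partition_nr_into_given_set_of_nrs nr S lim)

-- ===== LEMMAS AND PROOFS =====

-- What B's loop owes for one stack state: A's results under that state, pref-prepended.
def pvResultsOf (nrs : List Int) (st : Int × Int × Int × List Int) : List (List Int) :=
  (pvInnerA nrs st.1 st.2.1 st.2.2.1).map (st.2.2.2 ++ ·)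

-- Fuel weight of a state / a stack.
def pvWt (c : Nat) (st : Int × Int × Int × List Int) : Nat := c ^ (st.2.2.1 + 1).toNat
def pvWts (c : Nat) (stack : List (Int × Int × Int × List Int)) : Nat :=
  (stack.map (pvWt c)).sum

theorem pvInnerA_neg (nrs : List Int) (n i lim : Int) (h : lim < 0) :
    pvInnerA nrs n i lim = [] := by
  rw [pvInnerA]; simp [h]

theorem pvFoldl_reverse_cons {α β : Type} (P : α → Prop) [DecidablePred P] (c : α → β)
    (l : List α) (acc : List β) :
    l.reverse.foldl (fun st k => if P k then c k :: st else st) acc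
      = (l.filterMap (fun k => if P k then some (c k) else none)) ++ acc := by
  induction l generalizing acc with
  | nil => simp
  | cons a l ih =>
    simp only [List.reverse_cons, List.foldl_append, List.foldl_cons, List.foldl_nil,
      List.filterMap_cons, ih]
    split_ifs <;> simp

theorem pvFlatMap_filterMap {α β γ : Type} (g : α → Option β) (f : β → List γ) (l : List α) :
    (l.filterMap g).flatMap f = l.flatMap (fun a => (g a).elim [] f) := by
  induction l with
  | nil => simp
  | cons a l ih =>
    simp only [List.filterMap_cons, List.flatMap_cons]
    cases g a <;> simp [ih]

theorem pvLoopB_eq (nrs : List Int) (fuel : Nat) :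
    ∀ (stack : List (Int × Int × Int × List Int)) (out : List (List Int)),
      (∀ st ∈ stack, 0 ≤ st.2.1) →
      pvWts (nrs.length + 1) stack ≤ fuel →
      pvLoopB nrs fuel stack out = out ++ stack.flatMap (pvResultsOf nrs) := by
  induction fuel with
  | zero =>
    intro stack out _ hw
    match stack with
    | [] => simp [pvLoopB]
    | st :: rest =>
      exfalso
      have h1 : 1 ≤ pvWt (nrs.length + 1) st := Nat.one_le_pow _ _ (by omega)
      simp [pvWts] at hw; omega
  | succ fuel ih =>
    intro stack out hi hw
    match stack with
    | [] => simp [pvLoopB]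
    | (n, i, budget, pref) :: rest =>
      have hi0 : 0 ≤ i := hi _ (by exact List.mem_cons_self ..)
      have hirest : ∀ st ∈ rest, 0 ≤ st.2.1 := fun st hst => hi st (by simp [hst])
      by_cases hb : budget < 0
      · rw [pvLoopB]
        simp only [hb, if_true]
        rw [ih rest out hirest ?_]
        · simp [pvResultsOf, pvInnerA_neg nrs n i budget hb]
        · have h1 : 1 ≤ pvWt (nrs.length + 1) (n, i, budget, pref) :=
            Nat.one_le_pow _ _ (by omega)
          simp [pvWts] at hw ⊢; omega
      · push_neg at hb
        rw [pvLoopB]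
        simp only [if_neg (by omega : ¬ budget < 0)]
        have hrange : PySem.List.pyRange (((nrs.length : Int)) - 1) (i - 1) (-1)
            = (PySem.List.pyRange i ((nrs.length : Int)) 1).reverse := by
          rw [PySem.List.pyRange_neg_one_eq_reverse]
          norm_num
        set P : Int → Prop := fun k => PySem.List.pyGetD nrs k 0 ≤ n with hP
        set ch : Int → Int × Int × Int × List Int :=
          fun k => (n - PySem.List.pyGetD nrs k 0, k, budget - 1,
                    pref ++ [PySem.List.pyGetD nrs k 0]) with hch
        have hfold :
            (PySem.List.pyRange (((nrs.length : Int)) - 1) (i - 1) (-1)).foldl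
              (fun st k =>
                let v := PySem.List.pyGetD nrs k 0
                if v ≤ n then (n - v, k, budget - 1, pref ++ [v]) :: st else st) rest
            = ((PySem.List.pyRange i ((nrs.length : Int)) 1).filterMap
                (fun k => if P k then some (ch k) else none)) ++ rest := by
          rw [hrange]
          exact pvFoldl_reverse_cons P ch (PySem.List.pyRange i ((nrs.length : Int)) 1) rest
        rw [hfold]
        set childList := (PySem.List.pyRange i ((nrs.length : Int)) 1).filterMap
          (fun k => if P k then some (ch k) else none) with hcl
        -- the invariant holds for the new stack
        have hi' : ∀ st ∈ childList ++ rest, 0 ≤ st.2.1 := by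
          intro st hst
          rcases List.mem_append.1 hst with hst | hst
          · rcases List.mem_filterMap.1 hst with ⟨k, hk, hsome⟩
            have hk' := (PySem.List.mem_pyRange_one).1 hk
            split_ifs at hsome with hPk
            cases hsome; simp only [ch]; omega
          · exact hirest st hst
        -- fuel suffices for the new stack
        have hwts : pvWts (nrs.length + 1) (childList ++ rest) ≤ fuel := by
          have hlen : childList.length ≤ nrs.length := by
            have h1 : childList.length ≤ (PySem.List.pyRange i ((nrs.length : Int)) 1).length :=
              List.length_filterMap_le _ _
            have h2 : (PySem.List.pyRange i ((nrs.length : Int)) 1).length = (((nrs.length : Int)) - i).toNat :=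
              PySem.List.length_pyRange_one i ((nrs.length : Int))
            omega
          have hchwt : ∀ st ∈ childList, pvWt (nrs.length + 1) st
              = (nrs.length + 1) ^ budget.toNat := by
            intro st hst
            rcases List.mem_filterMap.1 hst with ⟨k, _, hsome⟩
            split_ifs at hsome with hPk
            cases hsome
            have hbn : (budget - 1 + 1).toNat = budget.toNat := by omega
            simp only [pvWt, ch]
            rw [hbn]
          have hsum : pvWts (nrs.length + 1) childList
              = childList.length * (nrs.length + 1) ^ budget.toNat := by
            simp only [pvWts]
            rw [List.map_congr_left hchwt]
            simp [List.sum_replicate, List.map_const']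
          have hsplit : pvWts (nrs.length + 1) (childList ++ rest)
              = pvWts (nrs.length + 1) childList + pvWts (nrs.length + 1) rest := by
            simp [pvWts]
          have hwhead : pvWt (nrs.length + 1) (n, i, budget, pref)
              = (nrs.length + 1) * (nrs.length + 1) ^ budget.toNat := by
            simp only [pvWt]
            have : (budget + 1).toNat = budget.toNat + 1 := by omega
            rw [this, pow_succ]; ring
          have hw' : pvWt (nrs.length + 1) (n, i, budget, pref)
              + pvWts (nrs.length + 1) rest ≤ fuel + 1 := by
            simpa [pvWts] using hw
          have hpow1 : 1 ≤ (nrs.length + 1) ^ budget.toNat :=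
            Nat.one_le_pow _ _ (by omega)
          nlinarith [hsplit, hsum, hwhead, hw', hpow1,
            Nat.mul_le_mul_right ((nrs.length + 1) ^ budget.toNat) hlen]
        rw [ih _ _ hi' hwts]
        -- now the pure list algebra: out' ++ results(children) ++ results(rest)
        have hchildren : childList.flatMap (pvResultsOf nrs)
            = ((PySem.List.pyRange i ((nrs.length : Int)) 1).flatMap (fun k =>
                let v := PySem.List.pyGetD nrs k 0
                if v ≤ n then (pvInnerA nrs (n - v) k (budget - 1)).map
                  (fun rest => v :: rest) else [])).map (pref ++ ·) := by
          rw [hcl, pvFlatMap_filterMap, List.map_flatMap]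
          congr 1
          funext k
          by_cases hPk : P k
          · have hle : PySem.List.pyGetD nrs k 0 ≤ n := hPk
            simp only [if_pos hPk, Option.elim, pvResultsOf, ch, if_pos hle]
            simp [List.map_map, Function.comp_def, List.append_assoc]
          · rw [if_neg hPk]
            have hnle : ¬ PySem.List.pyGetD nrs k 0 ≤ n := hPk
            simp [hnle]
        have hhead : pvResultsOf nrs (n, i, budget, pref)
            = (if n = 0 then [pref] else [])
              ++ ((PySem.List.pyRange i ((nrs.length : Int)) 1).flatMap (fun k =>
                    let v := PySem.List.pyGetD nrs k 0
                    if v ≤ n then (pvInnerA nrs (n - v) k (budget - 1)).map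
                      (fun rest => v :: rest) else [])).map (pref ++ ·) := by
          simp only [pvResultsOf]
          rw [pvInnerA]
          simp only [dif_pos hb, List.map_append]
          by_cases hn : n = 0 <;> simp [hn]
        simp only [List.flatMap_append, List.flatMap_cons, hchildren, hhead]
        by_cases hn : n = 0 <;> simp [hn, List.append_assoc]

theorem pvAlt_eq (nr : Int) (S : List Int) (lim : Int) :
    partition_nr_into_given_set_of_nrs_alt nr S lim
      = partition_nr_into_given_set_of_nrs nr S lim := by
  unfold partition_nr_into_given_set_of_nrs_alt partition_nr_into_given_set_of_nrs
  set nrs := PySem.List.sorted S (fun x => x) true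
  rw [pvLoopB_eq nrs _ [(nr, 0, lim, [])] []
      (by intro st hst; simp at hst; subst hst; simp)
      (by simp [pvWts, pvWt])]
  simp [pvResultsOf]

-- ===== VERDICT (by name: the statement is the Claim_ definition above) =====
theorem partition_nr_into_given_set_of_nrs_spec : Claim_equal_partition_nr_into_given_set_of_nrs := by
  intro nr S lim _ _
  unfold Spec_partition_nr_into_given_set_of_nrs
  exact (pvAlt_eq nr S lim).symm
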